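-- pv_equiv track=rewrite | github.com/KAUZCrop/meta-ads-scraper | app.py | _fix_unescaped_newlines
-- ===== SOURCE A (Python) =====
-- def _fix_unescaped_newlines(text: str) -> str:
--     """JSON string values에서 이스케이프되지 않은 줄바꿈을 공백으로 교체합니다."""
--     result = []
--     in_string = False
--     escape_next = False
--     bs = "\\"
--     dq = '"'
--     nl = "\n"
--     cr = "\r"
--     for ch in text:
--         if escape_next:
--             result.append(ch)
--             escape_next = False
--         elif ch == bs and in_string:
--             result.append(ch)
--             escape_next = True
--         elif ch == dq:
--             in_string = not in_string
--             result.append(ch)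
--         elif ch in (nl, cr) and in_string:
--             result.append(" ")
--         else:
--             result.append(ch)
--     return "".join(result)
-- ===== SOURCE B (Python) =====
-- def _fix_unescaped_newlines(text: str) -> str:
--     """JSON string values에서 이스케이프되지 않은 줄바꿈을 공백으로 교체합니다."""
--     out = []
--     i = 0
--     n = len(text)
--     while i < n:
--         ch = text[i]
--         out.append(ch)
--         i += 1
--         if ch == '"':
--             # inner loop: consume the string body up to the closing quote
--             while i < n:
--                 c = text[i]
--                 if c == '\\':
--                     out.append(c)
--                     i += 1
--                     if i < n:
--                         out.append(text[i])
--                         i += 1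
--                 elif c in ('\n', '\r'):
--                     out.append(' ')
--                     i += 1
--                 elif c == '"':
--                     out.append(c)
--                     i += 1
--                     break
--                 else:
--                     out.append(c)
--                     i += 1
--     return ''.join(out)
-- ===== Notes on version B (the rewrite author's own statement) =====
-- stated objective: alternative
-- what changed: Replaces A's single for-loop with two boolean state flags by an index-driven outer/inner while-loop pair: the inner loop consumes a whole JSON string body (handling backslash escapes by copying two characters at once) and exits at the closing quote, so no in_string/escape_next flags exist.
import Mathlib
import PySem

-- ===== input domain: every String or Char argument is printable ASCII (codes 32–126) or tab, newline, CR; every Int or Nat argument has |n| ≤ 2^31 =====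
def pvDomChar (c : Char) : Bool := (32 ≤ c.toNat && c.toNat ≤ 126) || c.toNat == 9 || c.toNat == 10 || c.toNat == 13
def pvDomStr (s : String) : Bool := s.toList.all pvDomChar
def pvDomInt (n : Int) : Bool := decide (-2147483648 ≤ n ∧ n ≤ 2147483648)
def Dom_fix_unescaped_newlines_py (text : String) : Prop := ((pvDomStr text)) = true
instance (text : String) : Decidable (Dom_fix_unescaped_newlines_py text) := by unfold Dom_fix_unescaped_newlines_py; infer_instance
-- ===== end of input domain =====

-- B rewrites A's flag-driven single loop as an outer/inner while-loop pair (no state flags); same values, alternative structure.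

-- ===== PORT A =====
-- state = (result, in_string, escape_next), exactly A's loop body
def fixA_step (st : List Char × Bool × Bool) (ch : Char) : List Char × Bool × Bool :=
  let res := st.1
  let ins := st.2.1
  let esc := st.2.2
  if esc then (res ++ [ch], ins, false)
  else if ch = '\\' ∧ ins then (res ++ [ch], ins, true)
  else if ch = '"' then (res ++ [ch], !ins, esc)
  else if (ch = '\n' ∨ ch = '\r') ∧ ins then (res ++ [' '], ins, esc)
  else (res ++ [ch], ins, esc)

def fix_unescaped_newlines_py (text : String) : String :=
  String.mk (text.toList.foldl fixA_step ([], false, false)).1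

-- ===== PORT B =====
-- outer loop (outside any string) / inner loop (inside a string body), mutual recursion = Source B's two while loops
mutual
def fixB_out : List Char → List Char
  | [] => []
  | ch :: rest => if ch = '"' then ch :: fixB_in rest else ch :: fixB_out rest

def fixB_in : List Char → List Char
  | [] => []
  | c :: rest =>
    if c = '\\' then
      match rest with
      | [] => [c]
      | d :: rest' => c :: d :: fixB_in rest'
    else if c = '\n' ∨ c = '\r' then ' ' :: fixB_in rest
    else if c = '"' then c :: fixB_out rest
    else c :: fixB_in rest
end

def fix_unescaped_newlines_py_alt (text : String) : String :=
  String.mk (fixB_out text.toList)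

-- ===== PRECONDITION & SPEC =====
def Spec_fix_unescaped_newlines_py (text : String) (out : String) : Prop := out = fix_unescaped_newlines_py_alt text
instance (text : String) (out : String) : Decidable (Spec_fix_unescaped_newlines_py text out) := by unfold Spec_fix_unescaped_newlines_py; infer_instance

-- ===== CLAIM (what is proved, stated in full; the proofs are below) =====
def Claim_equal_fix_unescaped_newlines_py : Prop := ∀ (text : String), Dom_fix_unescaped_newlines_py text → Spec_fix_unescaped_newlines_py text (fix_unescaped_newlines_py text)

-- ===== LEMMAS AND PROOFS =====

-- A's fold from a non-escaped state equals acc ++ the B-continuation chosen by in_string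
lemma fix_main : ∀ (n : Nat) (l : List Char), l.length ≤ n → ∀ (acc : List Char) (ins : Bool),
    (l.foldl fixA_step (acc, ins, false)).1 = acc ++ (if ins then fixB_in l else fixB_out l) := by
  intro n
  induction n with
  | zero =>
    intro l hl acc ins
    have : l = [] := List.eq_nil_of_length_eq_zero (Nat.le_zero.mp hl)
    subst this
    cases ins <;> simp [fixB_out, fixB_in]
  | succ n ih =>
    intro l hl acc ins
    cases l with
    | nil => cases ins <;> simp [fixB_out, fixB_in]
    | cons c rest =>
      have hr : rest.length ≤ n := Nat.le_of_succ_le_succ hl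
      cases ins with
      | false =>
        by_cases hq : c = '"'
        · subst hq
          simp [List.foldl_cons, fixA_step, ih rest hr, fixB_out]
        · simp [List.foldl_cons, fixA_step, hq, ih rest hr, fixB_out]
      | true =>
        by_cases hbs : c = '\\'
        · subst hbs
          cases rest with
          | nil =>
            simp [List.foldl_cons, fixA_step, fixB_in]
          | cons d rest' =>
            have hr' : rest'.length ≤ n := by simp at hr; omega
            simp [List.foldl_cons, fixA_step, ih rest' hr', fixB_in]
        · by_cases hnl : c = '\n' ∨ c = '\r'
          · have hq : c ≠ '"' := by rcases hnl with h | h <;> subst h <;> decide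
            rcases hnl with h | h <;> subst h <;>
              (conv_rhs => rw [fixB_in.eq_def]) <;>
              simp [List.foldl_cons, fixA_step, ih rest hr]
          · by_cases hq : c = '"'
            · subst hq
              conv_rhs => rw [fixB_in.eq_def]
              simp [List.foldl_cons, fixA_step, ih rest hr]
            · have h1 : c ≠ '\n' := fun h => hnl (Or.inl h)
              have h2 : c ≠ '\r' := fun h => hnl (Or.inr h)
              conv_rhs => rw [fixB_in.eq_def]
              simp [List.foldl_cons, fixA_step, hbs, hq, h1, h2, ih rest hr]

-- ===== VERDICT (by name: the statement is the Claim_ definition above) =====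
theorem fix_unescaped_newlines_py_spec : Claim_equal_fix_unescaped_newlines_py := by
  intro text _
  unfold Spec_fix_unescaped_newlines_py fix_unescaped_newlines_py fix_unescaped_newlines_py_alt
  rw [fix_main text.toList.length text.toList le_rfl [] false]
  simp
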